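-- pv_equiv track=rewrite | github.com/MaksimBaturin/data-mining-2024 | 1/5.py | FindNearestPrimeNumb
-- ===== SOURCE A (Python) =====
-- from math import sqrt
--
-- def IsPrime(numb):
--     for i in range(2, int(sqrt(numb))+1):
--         if (numb % i == 0):
--             return False
--     return True
--
-- def FindNearestPrimeNumb(n):
--     LowerNumb = n-1
--     UpperNumb = n+1
--     while True:
--         if IsPrime(LowerNumb):
--             return LowerNumb
--         if IsPrime(UpperNumb):
--             return UpperNumb
--         LowerNumb-=1
--         UpperNumb+=1
-- ===== SOURCE B (Python) =====
-- from math import sqrt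
--
-- def IsPrime(numb):
--     for i in range(2, int(sqrt(numb))+1):
--         if (numb % i == 0):
--             return False
--     return True
--
-- def FindNearestPrimeNumb(n):
--     # scan downward for the nearest lower candidate (done first, so a
--     # ValueError for n <= 0 happens exactly where A raises it)
--     lower = n - 1
--     while not IsPrime(lower):
--         lower -= 1
--     # scan upward for the nearest upper candidate
--     upper = n + 1
--     while not IsPrime(upper):
--         upper += 1
--     # ties prefer the lower value
--     return lower if (n - lower) <= (upper - n) else upper
-- ===== Notes on version B (the rewrite author's own statement) =====
-- stated objective: alternative
-- what changed: Replaces A's single interleaved while-True loop over a (lower,upper) pair by two independent linear scans (nearest candidate below, nearest candidate above) followed by one distance comparison with lower-preferring tie-break.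
import Mathlib
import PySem

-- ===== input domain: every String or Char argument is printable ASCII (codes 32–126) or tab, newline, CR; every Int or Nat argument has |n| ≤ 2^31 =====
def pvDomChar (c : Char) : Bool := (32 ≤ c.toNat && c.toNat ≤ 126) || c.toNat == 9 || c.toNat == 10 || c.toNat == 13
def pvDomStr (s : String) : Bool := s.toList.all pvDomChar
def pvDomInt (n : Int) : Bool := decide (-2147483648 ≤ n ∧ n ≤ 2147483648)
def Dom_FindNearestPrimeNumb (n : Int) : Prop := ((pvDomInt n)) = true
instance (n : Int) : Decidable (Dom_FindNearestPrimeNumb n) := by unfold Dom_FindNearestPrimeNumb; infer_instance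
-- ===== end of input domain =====

-- B replaces A's single interleaved while-True loop by two independent scans
-- (nearest candidate below, nearest candidate above) and one tie-breaking
-- distance comparison; an alternative decomposition, not claimed faster.

-- ===== PORT A =====

-- IsPrime: 'int(sqrt(numb))' ported as Nat.sqrt numb.toNat — exact for 0 ≤ numb ≤ 2^31
-- (double sqrt cannot cross an integer boundary there); Python raises ValueError for
-- numb < 0, which happens in A exactly when n ≤ 0, excluded by Pre_.
def IsPrime (numb : Int) : Bool :=
  (PySem.List.pyRange 2 (((Nat.sqrt numb.toNat) : Int) + 1) 1).all
    (fun i => !(PySem.Int.mod numb i == 0))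

-- needed by the ports' termination proofs, so it stays above them
theorem isPrime_of_le_one (m : Int) (h : m ≤ 1) : IsPrime m = true := by
  have h1 : m.toNat ≤ 1 := by omega
  have h2 : Nat.sqrt m.toNat ≤ 1 := le_trans (Nat.sqrt_le_sqrt h1) (by simp)
  unfold IsPrime
  rw [PySem.List.pyRange_one_eq_nil (by exact_mod_cast by omega)]
  rfl

theorem two_le_of_not_prime (m : Int) (h : ¬ IsPrime m = true) : 2 ≤ m := by
  by_contra hc
  exact h (isPrime_of_le_one m (by omega))

-- A's 'while True' loop over the pair (LowerNumb, UpperNumb)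
def loopA (L U : Int) : Int :=
  if IsPrime L then L
  else if IsPrime U then U
  else loopA (L - 1) (U + 1)
termination_by L.toNat
decreasing_by
  have := two_le_of_not_prime L (by assumption)
  omega

def FindNearestPrimeNumb (n : Int) : Int := loopA (n - 1) (n + 1)

-- ===== PORT B =====

-- downward scan: while not IsPrime(lower): lower -= 1
def downScan (L : Int) : Int :=
  if IsPrime L then L else downScan (L - 1)
termination_by L.toNat
decreasing_by
  have := two_le_of_not_prime L (by assumption)
  omega

-- termination of the upward scan: some number ≥ any start passes IsPrime
theorem exists_up (U : Int) : ∃ j : Nat, IsPrime (U + (j : Int)) = true := by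
  obtain ⟨p, hple, hp⟩ := Nat.exists_infinite_primes (U.toNat + 1)
  refine ⟨((p : Int) - U).toNat, ?_⟩
  have hU : U < (p : Int) := by omega
  have he : U + ((((p : Int) - U).toNat : Nat) : Int) = (p : Int) := by omega
  rw [he]
  unfold IsPrime
  simp only [Int.toNat_natCast]
  rw [List.all_eq_true]
  intro i hi
  rw [PySem.List.mem_pyRange_one] at hi
  have hsq : i.toNat ≤ Nat.sqrt p := by
    have : i ≤ (Nat.sqrt p : Int) := by omega
    omega
  simp only [Bool.not_eq_eq_eq_not, Bool.not_true, beq_eq_false_iff_ne, ne_eq]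
  rw [PySem.Int.mod_eq_zero_iff_dvd]
  intro hdvd
  have h2 : (2 : Int) ≤ i := hi.1
  have hdvdn : i.toNat ∣ p := by
    have : (i.toNat : Int) ∣ (p : Int) := by
      rwa [show ((i.toNat : Nat) : Int) = i by omega]
    exact_mod_cast this
  have hlt : Nat.sqrt p < p := Nat.sqrt_lt_self hp.one_lt
  rcases (hp.eq_one_or_self_of_dvd i.toNat hdvdn) with h | h <;> omega

-- upward scan: while not IsPrime(upper): upper += 1
def upScan (U : Int) : Int :=
  if IsPrime U then U else upScan (U + 1)
termination_by Nat.find (exists_up U)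
decreasing_by
  rename_i h
  have hs := Nat.find_spec (exists_up U)
  have hk : Nat.find (exists_up U) ≠ 0 := by
    intro h0
    rw [h0] at hs
    simp only [Nat.cast_zero, add_zero] at hs
    exact h hs
  have hle : Nat.find (exists_up (U + 1)) ≤ Nat.find (exists_up U) - 1 := by
    apply Nat.find_le
    rw [show U + 1 + ((Nat.find (exists_up U) - 1 : Nat) : Int)
          = U + (Nat.find (exists_up U) : Int) by omega]
    exact hs
  omega

def FindNearestPrimeNumb_alt (n : Int) : Int :=
  let lower := downScan (n - 1)
  let upper := upScan (n + 1)
  if n - lower ≤ upper - n then lower else upper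

-- ===== PRECONDITION & SPEC =====
-- Python's IsPrime raises ValueError on a negative argument (math.sqrt), which A
-- (and B) reach exactly when n ≤ 0; Pre_ keeps the inputs where A returns.
def Pre_FindNearestPrimeNumb (n : Int) : Prop := 1 ≤ n
instance (n : Int) : Decidable (Pre_FindNearestPrimeNumb n) := by unfold Pre_FindNearestPrimeNumb; infer_instance
def pvWitness_FindNearestPrimeNumb : Int := 10

def Spec_FindNearestPrimeNumb (n : Int) (out : Int) : Prop := out = FindNearestPrimeNumb_alt n
instance (n : Int) (out : Int) : Decidable (Spec_FindNearestPrimeNumb n out) := by unfold Spec_FindNearestPrimeNumb; infer_instance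

-- ===== CLAIM (what is proved, stated in full; the proofs are below) =====
def Claim_equal_FindNearestPrimeNumb : Prop := ∀ (n : Int), Dom_FindNearestPrimeNumb n → Pre_FindNearestPrimeNumb n → Spec_FindNearestPrimeNumb n (FindNearestPrimeNumb n)

-- ===== LEMMAS AND PROOFS =====

-- existence witness for the downward scan: everything ≤ 1 passes IsPrime
theorem exists_down (L : Int) : ∃ j : Nat, IsPrime (L - (j : Int)) = true :=
  ⟨(L - 1).toNat, isPrime_of_le_one _ (by omega)⟩

-- distance from L down to the first value passing IsPrime
def dL (L : Int) : Nat := Nat.find (exists_down L)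
-- distance from U up to the first value passing IsPrime
def dU (U : Int) : Nat := Nat.find (exists_up U)

theorem dL_zero (L : Int) (h : IsPrime L = true) : dL L = 0 := by
  unfold dL
  rw [Nat.find_eq_zero]
  simpa using h

theorem dU_zero (U : Int) (h : IsPrime U = true) : dU U = 0 := by
  unfold dU
  rw [Nat.find_eq_zero]
  simpa using h

theorem dL_succ (L : Int) (h : ¬ IsPrime L = true) : dL L = dL (L - 1) + 1 := by
  unfold dL
  have hne : Nat.find (exists_down L) ≠ 0 := by
    intro h0
    have hs := Nat.find_spec (exists_down L)
    rw [h0] at hs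
    simp only [Nat.cast_zero, sub_zero] at hs
    exact h hs
  have h1 : Nat.find (exists_down L) ≤ Nat.find (exists_down (L - 1)) + 1 := by
    apply Nat.find_le
    have hs := Nat.find_spec (exists_down (L - 1))
    rwa [show L - ((Nat.find (exists_down (L - 1)) + 1 : Nat) : Int)
          = L - 1 - (Nat.find (exists_down (L - 1)) : Int) by push_cast; ring]
  have h2 : Nat.find (exists_down (L - 1)) ≤ Nat.find (exists_down L) - 1 := by
    apply Nat.find_le
    have hs := Nat.find_spec (exists_down L)
    rwa [show L - 1 - ((Nat.find (exists_down L) - 1 : Nat) : Int)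
          = L - (Nat.find (exists_down L) : Int) by omega]
  omega

theorem dU_succ (U : Int) (h : ¬ IsPrime U = true) : dU U = dU (U + 1) + 1 := by
  unfold dU
  have hne : Nat.find (exists_up U) ≠ 0 := by
    intro h0
    have hs := Nat.find_spec (exists_up U)
    rw [h0] at hs
    simp only [Nat.cast_zero, add_zero] at hs
    exact h hs
  have h1 : Nat.find (exists_up U) ≤ Nat.find (exists_up (U + 1)) + 1 := by
    apply Nat.find_le
    have hs := Nat.find_spec (exists_up (U + 1))
    rwa [show U + ((Nat.find (exists_up (U + 1)) + 1 : Nat) : Int)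
          = U + 1 + (Nat.find (exists_up (U + 1)) : Int) by push_cast; ring]
  have h2 : Nat.find (exists_up (U + 1)) ≤ Nat.find (exists_up U) - 1 := by
    apply Nat.find_le
    have hs := Nat.find_spec (exists_up U)
    rwa [show U + 1 + ((Nat.find (exists_up U) - 1 : Nat) : Int)
          = U + (Nat.find (exists_up U) : Int) by omega]
  omega

theorem downScan_eq (L : Int) : downScan L = L - (dL L : Int) := by
  induction L using downScan.induct with
  | case1 L h => rw [downScan, if_pos h, dL_zero L h]; simp
  | case2 L h ih =>
      rw [downScan, if_neg h, ih, dL_succ L h]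
      push_cast
      ring

theorem upScan_eq (U : Int) : upScan U = U + (dU U : Int) := by
  induction U using upScan.induct with
  | case1 U h => rw [upScan, if_pos h, dU_zero U h]; simp
  | case2 U h ih =>
      rw [upScan, if_neg h, ih, dU_succ U h]
      push_cast
      ring

theorem loopA_eq (L U : Int) :
    loopA L U = if dL L ≤ dU U then L - (dL L : Int) else U + (dU U : Int) := by
  induction L, U using loopA.induct with
  | case1 L U h =>
      rw [loopA, if_pos h, dL_zero L h]
      simp
  | case2 L U h hU =>
      rw [loopA, if_neg h, if_pos hU, dU_zero U hU, dL_succ L h]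
      simp
  | case3 L U h hU ih =>
      rw [loopA, if_neg h, if_neg hU, ih, dL_succ L h, dU_succ U hU]
      by_cases hc : dL (L - 1) ≤ dU (U + 1)
      · rw [if_pos hc, if_pos (by omega)]
        push_cast; ring
      · rw [if_neg hc, if_neg (by omega)]
        push_cast; ring

-- ===== VERDICT (by name: the statement is the Claim_ definition above) =====
theorem FindNearestPrimeNumb_spec : Claim_equal_FindNearestPrimeNumb := by
  intro n _ _
  unfold Spec_FindNearestPrimeNumb FindNearestPrimeNumb FindNearestPrimeNumb_alt
  rw [loopA_eq, downScan_eq, upScan_eq]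
  by_cases hc : dL (n - 1) ≤ dU (n + 1)
  · rw [if_pos hc, if_pos (by omega)]
  · rw [if_neg hc, if_neg (by omega)]
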